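-- pv_equiv track=rewrite | github.com/manan-v/test2 | extra/obsolete/createMatrix.py | checkIfCommonRepo
-- ===== SOURCE A (Python) =====
-- def checkIfCommonRepo(contributorA, contributorB, contributorDict,activityType):
--     repoOfA=contributorDict[contributorA][activityType]
--     repoOfB = contributorDict[contributorB][activityType]
--     if(any(check in repoOfA for check in repoOfB)):
--         commonRepos=list(set(repoOfA).intersection(repoOfB))
--         numOfCommonRepos=len(commonRepos)
--         commonBool=True
--     else:
--         commonBool=False
--         numOfCommonRepos=0
--     return commonBool,numOfCommonRepos
-- ===== SOURCE B (Python) =====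
-- def checkIfCommonRepo(contributorA, contributorB, contributorDict, activityType):
--     repoOfA = contributorDict[contributorA][activityType]
--     repoOfB = contributorDict[contributorB][activityType]
--     # inclusion-exclusion: |A∩B| = |A| + |B| - |A∪B|; no membership scan, no branch
--     numOfCommonRepos = len(set(repoOfA)) + len(set(repoOfB)) - len(set(repoOfA + repoOfB))
--     return numOfCommonRepos > 0, numOfCommonRepos
-- ===== Notes on version B (the rewrite author's own statement) =====
-- stated objective: alternative
-- what changed: Replaces the quadratic any() membership scan plus intersection branch with inclusion-exclusion: the count of shared repos is len(set(A)) + len(set(B)) - len(set(A+B)), and the bool is derived from that count, with no branch.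
import Mathlib
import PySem

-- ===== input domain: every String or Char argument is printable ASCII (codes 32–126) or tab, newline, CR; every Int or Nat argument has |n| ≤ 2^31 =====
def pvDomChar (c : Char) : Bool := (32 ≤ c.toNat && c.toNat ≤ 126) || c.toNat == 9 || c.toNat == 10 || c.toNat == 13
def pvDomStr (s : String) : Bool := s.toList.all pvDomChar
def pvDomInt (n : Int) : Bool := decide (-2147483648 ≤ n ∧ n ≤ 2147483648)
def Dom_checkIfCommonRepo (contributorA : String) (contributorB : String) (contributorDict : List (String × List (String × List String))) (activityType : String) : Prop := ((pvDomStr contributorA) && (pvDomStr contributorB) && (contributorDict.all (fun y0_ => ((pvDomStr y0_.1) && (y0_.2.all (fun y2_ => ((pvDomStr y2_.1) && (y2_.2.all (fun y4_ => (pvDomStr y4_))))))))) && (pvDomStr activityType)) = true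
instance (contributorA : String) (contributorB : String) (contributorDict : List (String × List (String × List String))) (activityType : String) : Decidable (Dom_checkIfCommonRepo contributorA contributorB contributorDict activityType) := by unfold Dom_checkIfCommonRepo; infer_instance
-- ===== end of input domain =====

-- Header: B counts the shared repos by inclusion-exclusion on the deduplicated sizes
-- (|A| + |B| - |A∪B|), removing A's any() membership scan, intersection and branch.

-- contributorDict[c][t] (none = KeyError); used by Pre_
def pvRepos (d : List (String × List (String × List String))) (c t : String) : Option (List String) :=
  ((PySem.Dict.mk d).get? c).bind (fun inner => (PySem.Dict.mk inner).get? t)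

-- ===== PORT A =====
def checkIfCommonRepo (contributorA : String) (contributorB : String) (contributorDict : List (String × List (String × List String))) (activityType : String) : Bool × Int :=
  match ((PySem.Dict.mk contributorDict).get? contributorA).bind
          (fun inner => (PySem.Dict.mk inner).get? activityType),
        ((PySem.Dict.mk contributorDict).get? contributorB).bind
          (fun inner => (PySem.Dict.mk inner).get? activityType) with
  | some repoOfA, some repoOfB =>
      if repoOfB.any (fun check => repoOfA.contains check) then
        let commonRepos : List String := PySem.Set.inter (PySem.Set.ofList repoOfA) repoOfB
        let numOfCommonRepos : Int := PySem.List.len commonRepos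
        (true, numOfCommonRepos)
      else
        (false, 0)
  | _, _ => (false, 0)  -- KeyError in Python; outside Pre_

-- ===== PORT B =====
-- inclusion-exclusion count of the shared repos of two repo lists
def pvIncExcl (repoOfA repoOfB : List String) : Int :=
  PySem.Set.len (PySem.Set.ofList repoOfA) + PySem.Set.len (PySem.Set.ofList repoOfB)
    - PySem.Set.len (PySem.Set.ofList (repoOfA ++ repoOfB))

def checkIfCommonRepo_alt (contributorA : String) (contributorB : String) (contributorDict : List (String × List (String × List String))) (activityType : String) : Bool × Int :=
  let ra? := ((PySem.Dict.mk contributorDict).get? contributorA).bind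
               (fun inner => (PySem.Dict.mk inner).get? activityType)
  let rb? := ((PySem.Dict.mk contributorDict).get? contributorB).bind
               (fun inner => (PySem.Dict.mk inner).get? activityType)
  -- a none lookup is a KeyError in Python, outside Pre_; .getD's default is never reached there
  (ra?.bind fun repoOfA => rb?.map fun repoOfB =>
      let numOfCommonRepos := pvIncExcl repoOfA repoOfB
      ((decide (0 < numOfCommonRepos), numOfCommonRepos) : Bool × Int)).getD (false, 0)

-- ===== PRECONDITION & SPEC =====
-- Pre_ excludes exactly the inputs where Python A raises KeyError: a contributor name
-- missing from the dict, or the activity type missing from a contributor's inner dict.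
def Pre_checkIfCommonRepo (contributorA : String) (contributorB : String) (contributorDict : List (String × List (String × List String))) (activityType : String) : Prop :=
  (pvRepos contributorDict contributorA activityType).isSome = true ∧
  (pvRepos contributorDict contributorB activityType).isSome = true
instance (contributorA : String) (contributorB : String) (contributorDict : List (String × List (String × List String))) (activityType : String) : Decidable (Pre_checkIfCommonRepo contributorA contributorB contributorDict activityType) := by unfold Pre_checkIfCommonRepo; infer_instance

def pvWitness_checkIfCommonRepo : String × String × (List (String × List (String × List String))) × String :=
  ("alice", "bob", [("alice", [("commit", ["r1", "r2"])]), ("bob", [("commit", ["r2"])])], "commit")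

def Spec_checkIfCommonRepo (contributorA : String) (contributorB : String) (contributorDict : List (String × List (String × List String))) (activityType : String) (out : Bool × Int) : Prop := out = checkIfCommonRepo_alt contributorA contributorB contributorDict activityType
instance (contributorA : String) (contributorB : String) (contributorDict : List (String × List (String × List String))) (activityType : String) (out : Bool × Int) : Decidable (Spec_checkIfCommonRepo contributorA contributorB contributorDict activityType out) := by unfold Spec_checkIfCommonRepo; infer_instance

-- ===== CLAIM (what is proved, stated in full; the proofs are below) =====
def Claim_equal_checkIfCommonRepo : Prop := ∀ (contributorA : String) (contributorB : String) (contributorDict : List (String × List (String × List String))) (activityType : String), Dom_checkIfCommonRepo contributorA contributorB contributorDict activityType → Pre_checkIfCommonRepo contributorA contributorB contributorDict activityType → Spec_checkIfCommonRepo contributorA contributorB contributorDict activityType (checkIfCommonRepo contributorA contributorB contributorDict activityType)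

-- ===== LEMMAS AND PROOFS =====

-- len(set(l)) is the Finset cardinality of l's elements
lemma len_ofList_eq_card (l : List String) :
    (PySem.Set.ofList l : List String).length = l.toFinset.card := by
  have hnd : (PySem.Set.ofList l : List String).Nodup := PySem.Set.nodup_ofList l
  have hts : (PySem.Set.ofList l : List String).toFinset = l.toFinset := by
    apply Finset.ext; intro x
    simp [List.mem_toFinset, PySem.Set.mem_ofList]
  rw [← hts, List.toFinset_card_of_nodup hnd]

-- A's intersection list has the cardinality of the Finset intersection
lemma len_inter_eq_card (ra rb : List String) :
    (PySem.Set.inter (PySem.Set.ofList ra) rb : List String).length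
      = (ra.toFinset ∩ rb.toFinset).card := by
  have hnd : (PySem.Set.inter (PySem.Set.ofList ra) rb : List String).Nodup := by
    exact List.Nodup.filter _ (PySem.Set.nodup_ofList ra)
  have hts : (PySem.Set.inter (PySem.Set.ofList ra) rb : List String).toFinset
      = ra.toFinset ∩ rb.toFinset := by
    apply Finset.ext; intro x
    simp [PySem.Set.inter, PySem.Set.mem_ofList,
      PySem.Set.contains_eq_listContains]
  rw [← hts, List.toFinset_card_of_nodup hnd]

-- inclusion-exclusion: B's arithmetic count equals A's intersection length
lemma pvIncExcl_eq (ra rb : List String) :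
    pvIncExcl ra rb
      = ((PySem.Set.inter (PySem.Set.ofList ra) rb : List String).length : Int) := by
  unfold pvIncExcl
  simp only [PySem.Set.len, len_ofList_eq_card, len_inter_eq_card,
    List.toFinset_append]
  have h := Finset.card_inter_add_card_union ra.toFinset rb.toFinset
  omega

-- the any() scan is true iff the Finset intersection is nonempty
lemma any_iff_card_pos (ra rb : List String) :
    rb.any (fun check => ra.contains check) = true ↔ 0 < (ra.toFinset ∩ rb.toFinset).card := by
  rw [Finset.card_pos]
  constructor
  · intro h
    obtain ⟨x, hxb, hxa⟩ : ∃ x ∈ rb, x ∈ ra := by simpa using h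
    exact ⟨x, by simp [Finset.mem_inter, List.mem_toFinset, hxa, hxb]⟩
  · rintro ⟨x, hx⟩
    rw [Finset.mem_inter, List.mem_toFinset, List.mem_toFinset] at hx
    simp only [List.any_eq_true]
    exact ⟨x, hx.2, by simpa using hx.1⟩

-- ===== VERDICT (by name: the statement is the Claim_ definition above) =====
theorem checkIfCommonRepo_spec : Claim_equal_checkIfCommonRepo := by
  intro cA cB d t _ hPre
  obtain ⟨hA, hB⟩ := hPre
  obtain ⟨ra, hra⟩ := Option.isSome_iff_exists.mp hA
  obtain ⟨rb, hrb⟩ := Option.isSome_iff_exists.mp hB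
  rw [pvRepos] at hra hrb
  unfold Spec_checkIfCommonRepo checkIfCommonRepo checkIfCommonRepo_alt
  rw [hra, hrb]
  simp only [Option.bind_some, Option.map_some, Option.getD_some]
  simp only [pvIncExcl_eq, PySem.List.len]
  by_cases h : rb.any (fun check => ra.contains check) = true
  · have hpos := (any_iff_card_pos ra rb).mp h
    rw [if_pos h]
    simp [len_inter_eq_card, hpos]
  · have hz : (ra.toFinset ∩ rb.toFinset).card = 0 := by
      by_contra hne
      exact h ((any_iff_card_pos ra rb).mpr (Nat.pos_of_ne_zero hne))
    rw [if_neg h]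
    simp [len_inter_eq_card, hz]
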